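-- pv_equiv track=rewrite | github.com/thuuyennnn2311-design/AI | Week3/BTVN/bai6_gui.py | get_candidate_moves
-- ===== SOURCE A (Python) =====
-- def get_candidate_moves(board, n, radius=2):
--     candidates = set()
--     has_piece = False
--     for r in range(n):
--         for c in range(n):
--             if board[r][c] != '':
--                 has_piece = True
--                 for dr in range(-radius, radius+1):
--                     for dc in range(-radius, radius+1):
--                         nr, nc = r+dr, c+dc
--                         if 0 <= nr < n and 0 <= nc < n and board[nr][nc] == '':
--                             candidates.add((nr, nc))
--     if not has_piece:
--         mid = n // 2
--         return [(mid, mid)]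
--     return list(candidates) if candidates else []
-- ===== SOURCE B (Python) =====
-- def get_candidate_moves(board, n, radius=2):
--     # Inverted traversal: instead of expanding a box around every piece into a
--     # dedup set, scan each cell once and emit the empty cells that see a piece
--     # within the radius box (each cell is emitted at most once, no set needed).
--     if not any(board[r][c] != '' for r in range(n) for c in range(n)):
--         mid = n // 2
--         return [(mid, mid)]
--     result = []
--     for r in range(n):
--         for c in range(n):
--             if board[r][c] == '' and any(
--                 0 <= r + dr < n and 0 <= c + dc < n and board[r + dr][c + dc] != ''
--                 for dr in range(-radius, radius + 1)
--                 for dc in range(-radius, radius + 1)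
--             ):
--                 result.append((r, c))
--     return result
-- ===== Notes on version B (the rewrite author's own statement) =====
-- stated objective: alternative
-- what changed: B inverts the traversal: instead of expanding a radius box around every piece and accumulating a deduplicating set, it scans each cell once and emits the empty cells that have some piece within their radius box, so each candidate is produced at most once and no set is needed (the return value is a set-ordered list, so only its contents are specified).
import Mathlib
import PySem

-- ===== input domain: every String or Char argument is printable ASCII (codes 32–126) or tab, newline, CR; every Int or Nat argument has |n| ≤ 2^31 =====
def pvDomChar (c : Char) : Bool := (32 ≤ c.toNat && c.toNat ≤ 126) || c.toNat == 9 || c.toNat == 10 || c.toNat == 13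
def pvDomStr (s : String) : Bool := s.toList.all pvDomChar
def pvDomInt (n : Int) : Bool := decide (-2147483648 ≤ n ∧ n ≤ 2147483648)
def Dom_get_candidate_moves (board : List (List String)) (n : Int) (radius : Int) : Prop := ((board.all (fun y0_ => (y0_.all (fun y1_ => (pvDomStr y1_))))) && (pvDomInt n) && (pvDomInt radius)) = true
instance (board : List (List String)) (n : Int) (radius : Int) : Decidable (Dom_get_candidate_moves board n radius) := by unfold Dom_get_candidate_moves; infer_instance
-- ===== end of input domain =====

-- B inverts A's traversal (scan each empty cell for a nearby piece instead of
-- expanding a set around each piece); the function returns list(set), whose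
-- iteration order Python leaves to the hash table, so only the CONTENTS of the
-- returned list are specified (outputs are compared as sets): both ports
-- enumerate their candidates in row-major order.

-- board[r][c] (both Pythons contain this very expression; in-bounds under Pre_)
def pvCell (board : List (List String)) (r c : Int) : String :=
  PySem.List.pyGetD (PySem.List.pyGetD board r []) c ""

-- ===== PORT A =====
def get_candidate_moves (board : List (List String)) (n : Int) (radius : Int) : List (Int × Int) :=
  let st :=
    (PySem.List.pyRange 0 n).foldl (fun st r =>
      (PySem.List.pyRange 0 n).foldl (fun st c =>
        if pvCell board r c ≠ "" then
          ((PySem.List.pyRange (-radius) (radius + 1)).foldl (fun cand dr =>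
            (PySem.List.pyRange (-radius) (radius + 1)).foldl (fun cand dc =>
              if 0 ≤ r + dr ∧ r + dr < n ∧ 0 ≤ c + dc ∧ c + dc < n ∧
                  pvCell board (r + dr) (c + dc) = "" then
                PySem.Set.add cand (r + dr, c + dc)
              else cand) cand) st.1, true)
        else st) st)
      ((PySem.Set.empty : PySem.Set (Int × Int)), false)
  if st.2 = false then
    [(PySem.Int.floordiv n 2, PySem.Int.floordiv n 2)]
  else if st.1 ≠ [] then
    -- list(candidates): Python's set iteration order is hash-based and not
    -- modelled (the result is compared as a set); the set's elements are
    -- enumerated in row-major order (the key is injective on the candidates)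
    PySem.List.sorted st.1 (fun p => p.1 * n + p.2)
  else []

-- ===== PORT B =====
def pvAltHasPiece (board : List (List String)) (n : Int) : Bool :=
  (PySem.List.pyRange 0 n).any fun r =>
    (PySem.List.pyRange 0 n).any fun c => decide (pvCell board r c ≠ "")

def pvAltNearPiece (board : List (List String)) (n radius r c : Int) : Bool :=
  (PySem.List.pyRange (-radius) (radius + 1)).any fun dr =>
    (PySem.List.pyRange (-radius) (radius + 1)).any fun dc =>
      decide (0 ≤ r + dr ∧ r + dr < n ∧ 0 ≤ c + dc ∧ c + dc < n ∧
        pvCell board (r + dr) (c + dc) ≠ "")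

def get_candidate_moves_alt (board : List (List String)) (n : Int) (radius : Int) : List (Int × Int) :=
  if pvAltHasPiece board n = false then
    [(PySem.Int.floordiv n 2, PySem.Int.floordiv n 2)]
  else
    (PySem.List.pyRange 0 n).foldl (fun res r =>
      (PySem.List.pyRange 0 n).foldl (fun res c =>
        if pvCell board r c = "" ∧ pvAltNearPiece board n radius r c = true then
          res ++ [(r, c)]
        else res) res) []

-- ===== PRECONDITION & SPEC =====
-- exactly the inputs where Python A returns: board[r][c] is in bounds for all 0 ≤ r,c < n
def Pre_get_candidate_moves (board : List (List String)) (n : Int) (radius : Int) : Prop :=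
  n ≤ PySem.List.len board ∧ ∀ row ∈ board.take n.toNat, n ≤ (row.length : Int)
instance (board : List (List String)) (n : Int) (radius : Int) : Decidable (Pre_get_candidate_moves board n radius) := by unfold Pre_get_candidate_moves; infer_instance

def pvWitness_get_candidate_moves : List (List String) × Int × Int := ([["X", ""], ["", ""]], 2, 1)

def Spec_get_candidate_moves (board : List (List String)) (n : Int) (radius : Int) (out : List (Int × Int)) : Prop := out = get_candidate_moves_alt board n radius
instance (board : List (List String)) (n : Int) (radius : Int) (out : List (Int × Int)) : Decidable (Spec_get_candidate_moves board n radius out) := by unfold Spec_get_candidate_moves; infer_instance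

-- ===== CLAIM (what is proved, stated in full; the proofs are below) =====
def Claim_equal_get_candidate_moves : Prop := ∀ (board : List (List String)) (n : Int) (radius : Int), Dom_get_candidate_moves board n radius → Pre_get_candidate_moves board n radius → Spec_get_candidate_moves board n radius (get_candidate_moves board n radius)

-- ===== LEMMAS AND PROOFS =====

-- a foldl over a pair whose components evolve independently splits
theorem pv_foldl_pair {α β γ : Type} (l : List γ)
    (body : α × β → γ → α × β) (F : α → γ → α) (G : β → γ → β)
    (h : ∀ st x, body st x = (F st.1 x, G st.2 x)) :
    ∀ (a : α) (b : β), l.foldl body (a, b) = (l.foldl F a, l.foldl G b) := by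
  induction l with
  | nil => intro a b; rfl
  | cons x l ih => intro a b; simp only [List.foldl_cons, h]; exact ih _ _

-- membership through a foldl each of whose steps adds exactly the x with C x
theorem pv_mem_foldl {α β : Type} (y : α) (l : List β)
    (F : List α → β → List α) (C : β → Prop)
    (h : ∀ s x, y ∈ F s x ↔ y ∈ s ∨ C x) :
    ∀ s, y ∈ l.foldl F s ↔ y ∈ s ∨ ∃ x ∈ l, C x := by
  induction l with
  | nil => simp
  | cons x l ih =>
    intro s
    rw [List.foldl_cons, ih, h]
    constructor
    · rintro ((hy | hc) | ⟨z, hz, hcz⟩)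
      · exact Or.inl hy
      · exact Or.inr ⟨x, List.mem_cons_self .., hc⟩
      · exact Or.inr ⟨z, List.mem_cons_of_mem _ hz, hcz⟩
    · rintro (hy | ⟨z, hz, hcz⟩)
      · exact Or.inl (Or.inl hy)
      · rcases List.mem_cons.1 hz with rfl | hz'
        · exact Or.inl (Or.inr hcz)
        · exact Or.inr ⟨z, hz', hcz⟩

-- a foldl each of whose steps preserves Nodup preserves Nodup
theorem pv_nodup_foldl {α β : Type} (l : List β) (F : List α → β → List α)
    (h : ∀ s x, s.Nodup → (F s x).Nodup) :
    ∀ s, s.Nodup → (l.foldl F s).Nodup := by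
  induction l with
  | nil => intro s hs; exact hs
  | cons x l ih => intro s hs; exact ih _ (h _ _ hs)

-- the candidate condition shared by the two characterisations
def pvNear (board : List (List String)) (n radius i j : Int) : Prop :=
  0 ≤ i ∧ i < n ∧ 0 ≤ j ∧ j < n ∧ pvCell board i j = "" ∧
    ∃ r c, 0 ≤ r ∧ r < n ∧ 0 ≤ c ∧ c < n ∧ pvCell board r c ≠ "" ∧
      -radius ≤ i - r ∧ i - r ≤ radius ∧ -radius ≤ j - c ∧ j - c ≤ radius

theorem pv_memA (board : List (List String)) (n radius : Int) (y : Int × Int) :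
    y ∈ ((PySem.List.pyRange 0 n).foldl (fun st r =>
      (PySem.List.pyRange 0 n).foldl (fun st c =>
        if pvCell board r c ≠ "" then
          (PySem.List.pyRange (-radius) (radius + 1)).foldl (fun cand dr =>
            (PySem.List.pyRange (-radius) (radius + 1)).foldl (fun cand dc =>
              if 0 ≤ r + dr ∧ r + dr < n ∧ 0 ≤ c + dc ∧ c + dc < n ∧
                  pvCell board (r + dr) (c + dc) = "" then
                PySem.Set.add cand (r + dr, c + dc)
              else cand) cand) st
        else st) st) ([] : List (Int × Int)))
    ↔ pvNear board n radius y.1 y.2 := by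
  have hdc : ∀ (r c dr : Int) (s : List (Int × Int)),
      y ∈ (PySem.List.pyRange (-radius) (radius + 1)).foldl (fun cand dc =>
        if 0 ≤ r + dr ∧ r + dr < n ∧ 0 ≤ c + dc ∧ c + dc < n ∧
            pvCell board (r + dr) (c + dc) = "" then
          PySem.Set.add cand (r + dr, c + dc)
        else cand) s
      ↔ y ∈ s ∨ ∃ dc ∈ PySem.List.pyRange (-radius) (radius + 1),
          ((0 ≤ r + dr ∧ r + dr < n ∧ 0 ≤ c + dc ∧ c + dc < n ∧
            pvCell board (r + dr) (c + dc) = "") ∧ y = (r + dr, c + dc)) := by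
    intro r c dr s
    refine pv_mem_foldl y _ _ _ (fun s dc => ?_) s
    split_ifs with hP
    · rw [PySem.Set.mem_add]; tauto
    · tauto
  have hdr : ∀ (r c : Int) (s : List (Int × Int)),
      y ∈ (PySem.List.pyRange (-radius) (radius + 1)).foldl (fun cand dr =>
        (PySem.List.pyRange (-radius) (radius + 1)).foldl (fun cand dc =>
          if 0 ≤ r + dr ∧ r + dr < n ∧ 0 ≤ c + dc ∧ c + dc < n ∧
              pvCell board (r + dr) (c + dc) = "" then
            PySem.Set.add cand (r + dr, c + dc)
          else cand) cand) s
      ↔ y ∈ s ∨ ∃ dr ∈ PySem.List.pyRange (-radius) (radius + 1),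
          ∃ dc ∈ PySem.List.pyRange (-radius) (radius + 1),
            ((0 ≤ r + dr ∧ r + dr < n ∧ 0 ≤ c + dc ∧ c + dc < n ∧
              pvCell board (r + dr) (c + dc) = "") ∧ y = (r + dr, c + dc)) := by
    intro r c s
    exact pv_mem_foldl y _ _ _ (fun s dr => hdc r c dr s) s
  have hc : ∀ (r : Int) (s : List (Int × Int)),
      y ∈ (PySem.List.pyRange 0 n).foldl (fun st c =>
        if pvCell board r c ≠ "" then
          (PySem.List.pyRange (-radius) (radius + 1)).foldl (fun cand dr =>
            (PySem.List.pyRange (-radius) (radius + 1)).foldl (fun cand dc =>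
              if 0 ≤ r + dr ∧ r + dr < n ∧ 0 ≤ c + dc ∧ c + dc < n ∧
                  pvCell board (r + dr) (c + dc) = "" then
                PySem.Set.add cand (r + dr, c + dc)
              else cand) cand) st
        else st) s
      ↔ y ∈ s ∨ ∃ c ∈ PySem.List.pyRange 0 n, (pvCell board r c ≠ "" ∧
          ∃ dr ∈ PySem.List.pyRange (-radius) (radius + 1),
            ∃ dc ∈ PySem.List.pyRange (-radius) (radius + 1),
              ((0 ≤ r + dr ∧ r + dr < n ∧ 0 ≤ c + dc ∧ c + dc < n ∧
                pvCell board (r + dr) (c + dc) = "") ∧ y = (r + dr, c + dc))) := by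
    intro r s
    refine pv_mem_foldl y _ _ _ (fun s c => ?_) s
    split_ifs with hP
    · rw [hdr r c s]; simp [hP]
    · simp [hP]
  rw [pv_mem_foldl y _ _ _ (fun s r => hc r s) []]
  simp only [List.not_mem_nil, false_or, PySem.List.mem_pyRange_one, pvNear]
  constructor
  · rintro ⟨r, hr, c, hc', hpiece, dr, hdr', dc, hdc', ⟨h1, h2, h3, h4, h5⟩, rfl⟩
    exact ⟨h1, h2, h3, h4, h5, r, c, hr.1, hr.2, hc'.1, hc'.2, hpiece,
      by omega, by omega, by omega, by omega⟩
  · rintro ⟨h1, h2, h3, h4, h5, r, c, hr0, hrn, hc0, hcn, hpiece, hb1, hb2, hb3, hb4⟩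
    refine ⟨r, ⟨hr0, hrn⟩, c, ⟨hc0, hcn⟩, hpiece, y.1 - r, ⟨by omega, by omega⟩,
      y.2 - c, ⟨by omega, by omega⟩, ?_, ?_⟩
    · constructor
      · omega
      constructor
      · omega
      constructor
      · omega
      constructor
      · omega
      · have : r + (y.1 - r) = y.1 := by omega
        have h2' : c + (y.2 - c) = y.2 := by omega
        rw [this, h2']; exact h5
    · have : r + (y.1 - r) = y.1 := by omega
      have h2' : c + (y.2 - c) = y.2 := by omega
      rw [this, h2']

-- B's accumulating double loop is the flatMap of its row blocks
theorem pv_B_flatMap (board : List (List String)) (n radius : Int) :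
    ((PySem.List.pyRange 0 n).foldl (fun res r =>
      (PySem.List.pyRange 0 n).foldl (fun res c =>
        if pvCell board r c = "" ∧ pvAltNearPiece board n radius r c = true then
          res ++ [(r, c)]
        else res) res) ([] : List (Int × Int)))
    = (PySem.List.pyRange 0 n).flatMap (fun r =>
        ((PySem.List.pyRange 0 n).filter (fun c =>
          decide (pvCell board r c = "" ∧ pvAltNearPiece board n radius r c = true))).map
          (fun c => (r, c))) := by
  have h1 : ∀ (r : Int) (res : List (Int × Int)),
      (PySem.List.pyRange 0 n).foldl (fun res c =>
        if pvCell board r c = "" ∧ pvAltNearPiece board n radius r c = true then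
          res ++ [(r, c)]
        else res) res
      = res ++ ((PySem.List.pyRange 0 n).filter (fun c =>
          decide (pvCell board r c = "" ∧ pvAltNearPiece board n radius r c = true))).map
          (fun c => ((r, c) : Int × Int)) := by
    intro r res
    have h := PySem.List.foldl_append_if
      (fun c => decide (pvCell board r c = "" ∧ pvAltNearPiece board n radius r c = true))
      (fun c => ((r, c) : Int × Int)) (PySem.List.pyRange 0 n) res
    simpa using h
  have h2 := PySem.List.foldl_append_eq_flatMap
    (fun r => ((PySem.List.pyRange 0 n).filter (fun c =>
        decide (pvCell board r c = "" ∧ pvAltNearPiece board n radius r c = true))).map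
        (fun c => ((r, c) : Int × Int)))
    (PySem.List.pyRange 0 n) []
  calc ((PySem.List.pyRange 0 n).foldl (fun res r =>
          (PySem.List.pyRange 0 n).foldl (fun res c =>
            if pvCell board r c = "" ∧ pvAltNearPiece board n radius r c = true then
              res ++ [(r, c)]
            else res) res) ([] : List (Int × Int)))
      = ((PySem.List.pyRange 0 n).foldl (fun res r => res ++
          ((PySem.List.pyRange 0 n).filter (fun c =>
            decide (pvCell board r c = "" ∧ pvAltNearPiece board n radius r c = true))).map
            (fun c => ((r, c) : Int × Int))) ([] : List (Int × Int))) := by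
        congr 1
        funext res r
        exact h1 r res
    _ = _ := by simpa using h2

theorem pv_memB (board : List (List String)) (n radius : Int) (y : Int × Int) :
    y ∈ ((PySem.List.pyRange 0 n).foldl (fun res r =>
      (PySem.List.pyRange 0 n).foldl (fun res c =>
        if pvCell board r c = "" ∧ pvAltNearPiece board n radius r c = true then
          res ++ [(r, c)]
        else res) res) ([] : List (Int × Int)))
    ↔ pvNear board n radius y.1 y.2 := by
  rw [pv_B_flatMap]
  simp only [List.mem_flatMap, List.mem_map, List.mem_filter, decide_eq_true_eq,
    PySem.List.mem_pyRange_one, pvAltNearPiece, List.any_eq_true, pvNear]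
  constructor
  · rintro ⟨r, ⟨hr0, hrn⟩, c, ⟨⟨hc0, hcn⟩, hempty, dr, hdr, dc, hdc, h1, h2, h3, h4, h5⟩, rfl⟩
    exact ⟨hr0, hrn, hc0, hcn, hempty, r + dr, c + dc, h1, h2, h3, h4, h5,
      by omega, by omega, by omega, by omega⟩
  · rintro ⟨h1, h2, h3, h4, h5, r, c, hr0, hrn, hc0, hcn, hpiece, hb1, hb2, hb3, hb4⟩
    refine ⟨y.1, ⟨h1, h2⟩, y.2, ⟨⟨h3, h4⟩, h5, r - y.1, ⟨by omega, by omega⟩,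
      c - y.2, ⟨by omega, by omega⟩, ?_⟩, rfl⟩
    have e1 : y.1 + (r - y.1) = r := by omega
    have e2 : y.2 + (c - y.2) = c := by omega
    rw [e1, e2]
    exact ⟨hr0, hrn, hc0, hcn, hpiece⟩

theorem pv_main (board : List (List String)) (n radius : Int) :
    get_candidate_moves board n radius = get_candidate_moves_alt board n radius := by
  unfold get_candidate_moves get_candidate_moves_alt
  have hA : (PySem.List.pyRange 0 n).foldl (fun st r =>
      (PySem.List.pyRange 0 n).foldl (fun st c =>
        if pvCell board r c ≠ "" then
          ((PySem.List.pyRange (-radius) (radius + 1)).foldl (fun cand dr =>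
            (PySem.List.pyRange (-radius) (radius + 1)).foldl (fun cand dc =>
              if 0 ≤ r + dr ∧ r + dr < n ∧ 0 ≤ c + dc ∧ c + dc < n ∧
                  pvCell board (r + dr) (c + dc) = "" then
                PySem.Set.add cand (r + dr, c + dc)
              else cand) cand) st.1, true)
        else st) st)
      ((PySem.Set.empty : PySem.Set (Int × Int)), false)
      = ((PySem.List.pyRange 0 n).foldl (fun s r =>
          (PySem.List.pyRange 0 n).foldl (fun s c =>
            if pvCell board r c ≠ "" then
              (PySem.List.pyRange (-radius) (radius + 1)).foldl (fun cand dr =>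
                (PySem.List.pyRange (-radius) (radius + 1)).foldl (fun cand dc =>
                  if 0 ≤ r + dr ∧ r + dr < n ∧ 0 ≤ c + dc ∧ c + dc < n ∧
                      pvCell board (r + dr) (c + dc) = "" then
                    PySem.Set.add cand (r + dr, c + dc)
                  else cand) cand) s
            else s) s) ([] : List (Int × Int)),
        (PySem.List.pyRange 0 n).foldl (fun b r =>
          (PySem.List.pyRange 0 n).foldl (fun b c =>
            if pvCell board r c ≠ "" then true else b) b) false) := by
    refine pv_foldl_pair _ _ _ _ ?_ _ _
    intro st r
    obtain ⟨a, b⟩ := st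
    refine pv_foldl_pair _ _ _ _ ?_ a b
    intro st c
    obtain ⟨a', b'⟩ := st
    by_cases hp : pvCell board r c ≠ "" <;> simp [hp]
  rw [hA]
  have hbool : (PySem.List.pyRange 0 n).foldl (fun b r =>
      (PySem.List.pyRange 0 n).foldl (fun b c =>
        if pvCell board r c ≠ "" then true else b) b) false
      = pvAltHasPiece board n := by
    have hb1 : ∀ (r : Int) (b : Bool),
        (PySem.List.pyRange 0 n).foldl (fun b c =>
          if pvCell board r c ≠ "" then true else b) b
        = (b || (PySem.List.pyRange 0 n).any fun c => decide (pvCell board r c ≠ "")) := by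
      intro r b
      have h := PySem.List.foldl_if_true_eq
        (fun c => decide (pvCell board r c ≠ "")) (PySem.List.pyRange 0 n) b
      simpa using h
    calc (PySem.List.pyRange 0 n).foldl (fun b r =>
          (PySem.List.pyRange 0 n).foldl (fun b c =>
            if pvCell board r c ≠ "" then true else b) b) false
        = (PySem.List.pyRange 0 n).foldl (fun b r =>
            if ((PySem.List.pyRange 0 n).any fun c =>
              decide (pvCell board r c ≠ "")) = true then true else b) false := by
          congr 1
          funext b r
          rw [hb1]
          cases h : (PySem.List.pyRange 0 n).any fun c =>
            decide (pvCell board r c ≠ "") <;> simp [h]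
      _ = pvAltHasPiece board n := by
          have h := PySem.List.foldl_if_true_eq
            (fun r => (PySem.List.pyRange 0 n).any fun c =>
              decide (pvCell board r c ≠ "")) (PySem.List.pyRange 0 n) false
          simpa [pvAltHasPiece] using h
  rw [hbool]
  by_cases hhp : pvAltHasPiece board n = false
  · simp only [hhp, if_true]
  · have hmem : ∀ y : Int × Int,
        y ∈ ((PySem.List.pyRange 0 n).foldl (fun s r =>
          (PySem.List.pyRange 0 n).foldl (fun s c =>
            if pvCell board r c ≠ "" then
              (PySem.List.pyRange (-radius) (radius + 1)).foldl (fun cand dr =>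
                (PySem.List.pyRange (-radius) (radius + 1)).foldl (fun cand dc =>
                  if 0 ≤ r + dr ∧ r + dr < n ∧ 0 ≤ c + dc ∧ c + dc < n ∧
                      pvCell board (r + dr) (c + dc) = "" then
                    PySem.Set.add cand (r + dr, c + dc)
                  else cand) cand) s
            else s) s) ([] : List (Int × Int)))
        ↔ y ∈ ((PySem.List.pyRange 0 n).foldl (fun res r =>
          (PySem.List.pyRange 0 n).foldl (fun res c =>
            if pvCell board r c = "" ∧ pvAltNearPiece board n radius r c = true then
              res ++ [(r, c)]
            else res) res) ([] : List (Int × Int))) := by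
      intro y
      rw [pv_memA board n radius y, pv_memB board n radius y]
    have hn1 : 0 < n := by
      have h1 : pvAltHasPiece board n = true := by
        cases h : pvAltHasPiece board n
        · exact absurd h hhp
        · rfl
      unfold pvAltHasPiece at h1
      rw [List.any_eq_true] at h1
      obtain ⟨r, hr, -⟩ := h1
      rw [PySem.List.mem_pyRange_one] at hr
      omega
    have hnodupA : ((PySem.List.pyRange 0 n).foldl (fun s r =>
        (PySem.List.pyRange 0 n).foldl (fun s c =>
          if pvCell board r c ≠ "" then
            (PySem.List.pyRange (-radius) (radius + 1)).foldl (fun cand dr =>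
              (PySem.List.pyRange (-radius) (radius + 1)).foldl (fun cand dc =>
                if 0 ≤ r + dr ∧ r + dr < n ∧ 0 ≤ c + dc ∧ c + dc < n ∧
                    pvCell board (r + dr) (c + dc) = "" then
                  PySem.Set.add cand (r + dr, c + dc)
                else cand) cand) s
          else s) s) ([] : List (Int × Int))).Nodup := by
      refine pv_nodup_foldl _ _ ?_ _ List.nodup_nil
      intro s r hs
      refine pv_nodup_foldl _ _ ?_ _ hs
      intro s c hs
      split_ifs with hp
      · refine pv_nodup_foldl _ _ ?_ _ hs
        intro s dr hs
        refine pv_nodup_foldl _ _ ?_ _ hs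
        intro s dc hs
        split_ifs with hq
        · exact PySem.Set.nodup_add _ _ hs
        · exact hs
      · exact hs
    have hpairB : ((PySem.List.pyRange 0 n).foldl (fun res r =>
        (PySem.List.pyRange 0 n).foldl (fun res c =>
          if pvCell board r c = "" ∧ pvAltNearPiece board n radius r c = true then
            res ++ [(r, c)]
          else res) res) ([] : List (Int × Int))).Pairwise
        (fun p q => p.1 * n + p.2 < q.1 * n + q.2) := by
      rw [pv_B_flatMap board n radius, List.pairwise_flatMap]
      constructor
      · intro r _hr
        rw [List.pairwise_map]
        refine List.Pairwise.imp ?_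
          (List.Pairwise.filter _ (PySem.List.pairwise_lt_pyRange_one 0 n))
        intro c c' h
        simpa using add_lt_add_left h (r * n)
      · refine List.Pairwise.imp ?_ (PySem.List.pairwise_lt_pyRange_one 0 n)
        intro r r' hrr' x hx y hy
        obtain ⟨c, hc, rfl⟩ := List.mem_map.1 hx
        obtain ⟨c', hc', rfl⟩ := List.mem_map.1 hy
        have hcm := PySem.List.mem_pyRange_one.1 (List.mem_filter.1 hc).1
        have hcm' := PySem.List.mem_pyRange_one.1 (List.mem_filter.1 hc').1
        have hstep : (r + 1) * n ≤ r' * n :=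
          mul_le_mul_of_nonneg_right (by omega) (by omega)
        simp only []
        nlinarith [hstep, hcm.1, hcm.2, hcm'.1]
    have hnodupB := List.Pairwise.imp
      (fun {p q : Int × Int} (hlt : p.1 * n + p.2 < q.1 * n + q.2) =>
        (ne_of_apply_ne (fun z : Int × Int => z.1 * n + z.2) (ne_of_lt hlt) : p ≠ q))
      hpairB
    have hperm := (List.perm_ext_iff_of_nodup hnodupB hnodupA).2
      (fun a => (hmem a).symm)
    have htrue : pvAltHasPiece board n = true := by
      cases h : pvAltHasPiece board n
      · exact absurd h hhp
      · rfl
    rw [htrue]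
    simp only [Bool.true_eq_false, if_false]
    split_ifs with hne
    · exact PySem.List.sorted_eq_of_perm_of_pairwise_lt _ _ _ hperm hpairB
    · have hA0 := not_ne_iff.mp hne
      rw [hA0] at hperm
      exact (hperm.eq_nil).symm

-- ===== VERDICT (by name: the statement is the Claim_ definition above) =====
theorem get_candidate_moves_spec : Claim_equal_get_candidate_moves := by
  intro board n radius _ _
  exact pv_main board n radius
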